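-- pv_equiv track=rewrite | github.com/dudehowdoufeel/python2 | hw6/6.py | cntfnums
-- ===== SOURCE A (Python) =====
-- def cntfnums(n):
--     mod = 1000000007
--
--     vd = [0, 1, 2, 3, 4, 5, 6, 7, 8, 9]
--
--     dp = [0] * (n + 1)
--     dp[0] = 1
--
--     for length in range(1, n + 1):
--         for digit in vd:
--             if length == 1 and digit == 0:
--                 continue
--             dp[length] = (dp[length] + dp[length - 1]) % mod
--
--     total = sum(dp[1:n + 1]) % mod
--
--     return total
-- ===== SOURCE B (Python) =====
-- def cntfnums(n):
--     mod = 1000000007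
--     return (pow(10, n, mod) - 1) % mod
-- ===== Notes on version B (the rewrite author's own statement) =====
-- stated objective: faster
-- what changed: Replaces the O(n) dp-table loop (10 modular additions per length, then a sum over the table) with the closed form (pow(10, n, mod) - 1) % mod computed by built-in fast modular exponentiation.
import Mathlib
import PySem

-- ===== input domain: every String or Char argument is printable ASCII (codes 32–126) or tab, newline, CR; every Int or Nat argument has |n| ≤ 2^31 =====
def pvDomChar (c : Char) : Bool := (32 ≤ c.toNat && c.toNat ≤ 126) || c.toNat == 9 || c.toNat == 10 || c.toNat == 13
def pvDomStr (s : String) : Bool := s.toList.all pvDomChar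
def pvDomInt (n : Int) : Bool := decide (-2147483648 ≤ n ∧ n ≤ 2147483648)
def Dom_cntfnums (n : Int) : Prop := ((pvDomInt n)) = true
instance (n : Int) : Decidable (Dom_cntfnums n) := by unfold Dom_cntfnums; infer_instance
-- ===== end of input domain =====

-- B replaces A's O(n) dp loop by the closed form (10^n - 1) mod p via fast modular exponentiation.


-- ===== PORT A =====
-- dp is kept as an Array Int (Python's list has O(1) индекс access; a linked List would not
-- evaluate in time).  All indices written are 1..n, hence nonnegative, so .toNat is exact there;
-- Pre_ (0 ≤ n) excludes the inputs where Python raises (dp[0] = 1 on the empty list).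
def cntfnums (n : Int) : Int :=
  let m : Int := 1000000007
  let vd : List Int := [0, 1, 2, 3, 4, 5, 6, 7, 8, 9]
  let dp0 : Array Int := Array.replicate (n + 1).toNat 0    -- [0] * (n + 1)
  let dp1 : Array Int := dp0.setIfInBounds 0 1              -- dp[0] = 1
  let dp : Array Int :=
    (PySem.List.pyRange 1 (n + 1) 1).foldl
      (fun dp length =>
        vd.foldl
          (fun dp digit =>
            if length = 1 ∧ digit = 0 then dp
            else dp.setIfInBounds length.toNat
              (PySem.Int.mod
                (dp.getD length.toNat 0 + dp.getD (length - 1).toNat 0) m))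
          dp)
      dp1
  PySem.Int.mod (PySem.List.slice dp.toList (some 1) (some (n + 1))).sum m

-- ===== PORT B =====
-- pow(10, n, mod) is PySem.Int.powMod; exact on Pre_ (0 ≤ n), where the exponent is n.toNat = n
def cntfnums_alt (n : Int) : Int :=
  PySem.Int.mod (PySem.Int.powMod 10 n.toNat 1000000007 - 1) 1000000007

-- ===== PRECONDITION & SPEC =====
-- Pre_ excludes exactly n < 0, where A raises IndexError (dp = [0]*(n+1) is empty, dp[0] = 1 fails)
def Pre_cntfnums (n : Int) : Prop := 0 ≤ n
instance (n : Int) : Decidable (Pre_cntfnums n) := by unfold Pre_cntfnums; infer_instance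
def pvWitness_cntfnums : Int := (3)

def Spec_cntfnums (n : Int) (out : Int) : Prop := out = cntfnums_alt n
instance (n : Int) (out : Int) : Decidable (Spec_cntfnums n out) := by unfold Spec_cntfnums; infer_instance

-- ===== CLAIM (what is proved, stated in full; the proofs are below) =====
def Claim_equal_cntfnums : Prop := ∀ (n : Int), Dom_cntfnums n → Pre_cntfnums n → Spec_cntfnums n (cntfnums n)

-- ===== LEMMAS AND PROOFS =====

-- dp[k+1] after the loop (0-indexed over lengths 1..n): pvV 0 = dp[1] = 9, pvV (k+1) = (10 * pvV k) % p
def pvV : Nat → Int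
  | 0 => 9
  | (k+1) => (10 * pvV k) % 1000000007

-- the dp list after processing lengths 1..k, for n = N
def pvDl (N k : Nat) : List Int :=
  1 :: ((List.range N).map (fun i => if i < k then pvV i else 0))

-- A's inner loop, on the list view of dp
def pvBodyL (dp : List Int) (length : Int) : List Int :=
  ([0, 1, 2, 3, 4, 5, 6, 7, 8, 9] : List Int).foldl
    (fun dp digit =>
      if length = 1 ∧ digit = 0 then dp
      else dp.set length.toNat
        (PySem.Int.mod
          (dp.getD length.toNat 0 + dp.getD (length - 1).toNat 0) 1000000007))
    dp

theorem pvV_mod (k : Nat) : pvV k % 1000000007 = (9 * 10 ^ k) % 1000000007 := by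
  induction k with
  | zero => norm_num [pvV]
  | succ k ih =>
    show (10 * pvV k) % 1000000007 % 1000000007 = _
    rw [Int.emod_emod_of_dvd _ dvd_rfl, Int.mul_emod, ih, ← Int.mul_emod]
    ring_nf

theorem pvSum_mod (N : Nat) :
    ((List.range N).map pvV).sum % 1000000007 = (10 ^ N - 1) % 1000000007 := by
  induction N with
  | zero => norm_num
  | succ N ih =>
    rw [List.range_succ, List.map_append, List.sum_append]
    simp only [List.map_cons, List.map_nil, List.sum_cons, List.sum_nil, add_zero]
    rw [Int.add_emod, ih, pvV_mod, ← Int.add_emod]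
    ring_nf

-- Array/List bridges: dp as an Array is the same data as its list view
theorem pvArrGetD (l : List Int) (i : Nat) (d : Int) : l.toArray.getD i d = l.getD i d := by
  simp only [Array.getD, List.size_toArray, List.getD_eq_getElem?_getD]
  split_ifs with h
  · simp [List.getElem?_eq_getElem h]
  · rw [List.getElem?_eq_none (by omega)]
    rfl

theorem pvFold_toArray (digits : List Int) (f : List Int → Int → List Int)
    (g : Array Int → Int → Array Int)
    (h : ∀ (l : List Int) (d : Int), g l.toArray d = (f l d).toArray) (l : List Int) :
    digits.foldl g l.toArray = (digits.foldl f l).toArray := by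
  induction digits generalizing l with
  | nil => rfl
  | cons x xs ih => rw [List.foldl_cons, List.foldl_cons, h, ih]

-- A's inner loop on arrays is the inner loop on the list view
theorem pvBody_bridge (l : List Int) (length : Int) :
    (fun (dp : Array Int) (length : Int) =>
      ([0, 1, 2, 3, 4, 5, 6, 7, 8, 9] : List Int).foldl
        (fun dp digit =>
          if length = 1 ∧ digit = 0 then dp
          else dp.setIfInBounds length.toNat
            (PySem.Int.mod
              (dp.getD length.toNat 0 + dp.getD (length - 1).toNat 0) 1000000007))
        dp) l.toArray length
    = (pvBodyL l length).toArray := by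
  exact pvFold_toArray _ _ _
    (fun l' d => by
      by_cases hc : length = 1 ∧ d = 0
      · rw [if_pos hc, if_pos hc]
      · rw [if_neg hc, if_neg hc, pvArrGetD, pvArrGetD, List.setIfInBounds_toArray]) l

theorem pvGetD_set (l : List Int) (i j : Nat) (a d : Int) (h : i < l.length) :
    (l.set i a).getD j d = if j = i then a else l.getD j d := by
  simp only [List.getD_eq_getElem?_getD, List.getElem?_set]
  by_cases hij : j = i
  · subst hij; simp [h]
  · simp [Ne.symm hij, hij]

theorem pvDl_length (N k : Nat) : (pvDl N k).length = N + 1 := by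
  simp [pvDl]

theorem pvDl_getD (N k j : Nat) (h1 : 1 ≤ j) (hj : j ≤ N) :
    (pvDl N k).getD j 0 = if j - 1 < k then pvV (j - 1) else 0 := by
  obtain ⟨j', rfl⟩ : ∃ j', j = j' + 1 := ⟨j - 1, by omega⟩
  simp only [pvDl, List.getD_cons_succ, Nat.add_sub_cancel]
  rw [PySem.List.getD_map_range _ _ _ _ (by omega)]

theorem pvDl_set (N k : Nat) :
    (pvDl N k).set (k + 1) (pvV k) = pvDl N (k + 1) := by
  simp only [pvDl, List.set_cons_succ]
  congr 1
  apply List.ext_getElem (by simp)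
  intro i h1 h2
  simp only [List.getElem_set, List.getElem_map, List.getElem_range]
  by_cases hik : k = i
  · subst hik; simp
  · rw [if_neg hik]
    by_cases h' : i < k
    · rw [if_pos h', if_pos (by omega)]
    · rw [if_neg h', if_neg (by omega)]

-- A's inner loop: l.length repeated additions of x into slot L (mod p)
theorem pvSteps (l : List Int) (dp : List Int) (L : Nat) (h1 : 1 ≤ L) (hL : L < dp.length)
    (a j x : Int) (ha : dp.getD L 0 = (a + j * x) % 1000000007) (hx : dp.getD (L - 1) 0 = x) :
    l.foldl (fun d (_ : Int) =>
        d.set L ((d.getD L 0 + d.getD (L - 1) 0) % 1000000007)) dp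
      = dp.set L ((a + (j + l.length) * x) % 1000000007) := by
  induction l generalizing dp j with
  | nil =>
    simp only [List.foldl_nil, List.length_nil, Nat.cast_zero, add_zero]
    rw [← ha, List.getD_eq_getElem _ _ hL]
    exact (List.set_getElem_self hL).symm
  | cons hd tl ih =>
    rw [List.foldl_cons, ha, hx]
    have hstep : ((a + j * x) % 1000000007 + x) % 1000000007
        = (a + (j + 1) * x) % 1000000007 := by
      rw [Int.emod_add_emod]; ring_nf
    rw [hstep]
    have hL' : L < (dp.set L ((a + (j + 1) * x) % 1000000007)).length := by
      simpa using hL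
    rw [ih (dp := dp.set L ((a + (j + 1) * x) % 1000000007)) (j := j + 1) (hL := hL')
      (ha := by rw [pvGetD_set _ _ _ _ _ hL, if_pos rfl])
      (hx := by rw [pvGetD_set _ _ _ _ _ hL, if_neg (by omega)]; exact hx)]
    rw [List.set_set]
    congr 2
    push_cast [List.length_cons]
    ring

-- one pass of A's outer loop, at length = k + 1
theorem pvInner (N k : Nat) (hk : k < N) :
    pvBodyL (pvDl N k) ((k : Int) + 1) = pvDl N (k + 1) := by
  have hL : k + 1 < (pvDl N k).length := by rw [pvDl_length]; omega
  have t1 : ((k : Int) + 1).toNat = k + 1 := by omega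
  have t2 : (((k : Int) + 1) - 1).toNat = k := by omega
  unfold pvBodyL
  cases k with
  | zero =>
    -- length = 1: digit 0 is skipped, then 9 additions of dp[0] = 1 into dp[1]
    rw [show ([0, 1, 2, 3, 4, 5, 6, 7, 8, 9] : List Int)
        = 0 :: [1, 2, 3, 4, 5, 6, 7, 8, 9] from rfl, List.foldl_cons]
    rw [if_pos (by norm_num)]
    rw [PySem.List.foldl_congr_mem _ _
      (fun d (_ : Int) => d.set 1 ((d.getD 1 0 + d.getD (1 - 1) 0) % 1000000007)) _
      (by
        intro acc y hy
        rw [if_neg (by rintro ⟨-, h⟩; fin_cases hy <;> simp_all)]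
        rw [t1, t2, PySem.Int.mod_eq_emod_of_pos (by norm_num)])]
    rw [pvSteps _ _ 1 le_rfl (by simpa using hL) 0 0 1
      (by rw [pvDl_getD N 0 1 le_rfl (by omega)]; norm_num)
      (by norm_num [pvDl])]
    norm_num
    exact pvDl_set N 0
  | succ k' =>
    -- length = k' + 2 ≥ 2: 10 additions of dp[k'+1] = pvV k' into dp[k'+2]
    rw [PySem.List.foldl_congr_mem _ _
      (fun d (_ : Int) => d.set (k' + 1 + 1)
        ((d.getD (k' + 1 + 1) 0 + d.getD (k' + 1 + 1 - 1) 0) % 1000000007)) _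
      (by
        intro acc y hy
        rw [if_neg (by rintro ⟨h, -⟩; push_cast at h; omega)]
        rw [t1, t2, show k' + 1 + 1 - 1 = k' + 1 from rfl,
          PySem.Int.mod_eq_emod_of_pos (by norm_num)])]
    rw [pvSteps _ _ (k' + 1 + 1) (by omega) hL 0 0 (pvV k')
      (by
        rw [pvDl_getD N (k' + 1) (k' + 1 + 1) (by omega) (by omega),
          if_neg (by omega)]
        norm_num)
      (by
        rw [show k' + 1 + 1 - 1 = k' + 1 from rfl,
          pvDl_getD N (k' + 1) (k' + 1) (by omega) (by omega),
          if_pos (by omega)]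
        norm_num)]
    have hv : (0 + ((0 : Int) + ↑(([0, 1, 2, 3, 4, 5, 6, 7, 8, 9] : List Int).length))
        * pvV k') % 1000000007 = pvV (k' + 1) := by
      show _ = (10 * pvV k') % 1000000007
      norm_num
    rw [hv]
    exact pvDl_set N (k' + 1)

-- the outer loop invariant, on the list view
theorem pvOuter (N k : Nat) (hk : k ≤ N) :
    (PySem.List.pyRange 1 ((k : Int) + 1) 1).foldl pvBodyL (pvDl N 0) = pvDl N k := by
  induction k with
  | zero =>
    rw [show ((0 : Nat) : Int) + 1 = 1 by norm_num,
      PySem.List.pyRange_one_eq_nil le_rfl, List.foldl_nil]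
  | succ k ih =>
    rw [show ((k + 1 : Nat) : Int) + 1 = ((k : Int) + 1) + 1 by push_cast; ring,
      PySem.List.pyRange_one_succ_right (by omega), List.foldl_append,
      ih (by omega), List.foldl_cons, List.foldl_nil]
    exact pvInner N k (by omega)

-- ===== VERDICT (by name: the statement is the Claim_ definition above) =====
theorem cntfnums_spec : Claim_equal_cntfnums := by
  intro n hdom hpre
  obtain ⟨N, rfl⟩ : ∃ N : Nat, n = (N : Int) := ⟨n.toNat, (Int.toNat_of_nonneg hpre).symm⟩
  show cntfnums _ = cntfnums_alt _
  have hN1 : ((N : Int) + 1) = ((N + 1 : Nat) : Int) := by push_cast; ring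
  have h0 : (Array.replicate ((N : Int) + 1).toNat (0 : Int)).setIfInBounds 0 1
      = (pvDl N 0).toArray := by
    rw [hN1, Int.toNat_natCast, Array.replicate_eq_toArray_replicate,
      List.setIfInBounds_toArray, List.replicate_succ, List.set_cons_zero]
    have : pvDl N 0 = 1 :: List.replicate N 0 := by
      simp [pvDl, List.map_const']
    rw [this]
  simp only [cntfnums, cntfnums_alt]
  rw [h0, pvFold_toArray _ pvBodyL _ pvBody_bridge (pvDl N 0), pvOuter N N le_rfl,
    List.toList_toArray]
  rw [PySem.List.slice_toNat _ (by norm_num) (by positivity), hN1, Int.toNat_natCast,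
    Int.toNat_one]
  rw [show (pvDl N N) = 1 :: (List.range N).map (fun i => if i < N then pvV i else 0) from rfl]
  simp only [List.drop_succ_cons, List.drop_zero, Nat.add_sub_cancel]
  rw [List.take_of_length_le (by simp)]
  rw [List.map_congr_left (fun i hi => if_pos (List.mem_range.mp hi))]
  rw [Int.toNat_natCast]
  have hm : ∀ a : Int, PySem.Int.mod a 1000000007 = a % 1000000007 :=
    fun a => PySem.Int.mod_eq_emod_of_pos (by norm_num)
  simp only [PySem.Int.powMod, hm]
  rw [pvSum_mod, Int.sub_emod (10 ^ N) 1]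
  norm_num
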